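-- pv_equiv track=rewrite | github.com/BenG49/cpu | asm/test.py | umul
-- ===== SOURCE A (Python) =====
-- def umul(a: int, b: int) -> int:
-- 	if b == 0:
-- 		return 0
--
-- 	out = 0
--
-- 	while a - 1 >= 0:
-- 		out += b
-- 		a -= 1
--
-- 	return out
-- ===== SOURCE B (Python) =====
-- def umul(a: int, b: int) -> int:
--     # closed form: the loop adds b exactly max(a,0) times
--     return max(a, 0) * b
-- ===== Notes on version B (the rewrite author's own statement) =====
-- stated objective: faster
-- what changed: Replaced the repeated-addition loop with the closed form max(a,0)*b.
import Mathlib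
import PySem

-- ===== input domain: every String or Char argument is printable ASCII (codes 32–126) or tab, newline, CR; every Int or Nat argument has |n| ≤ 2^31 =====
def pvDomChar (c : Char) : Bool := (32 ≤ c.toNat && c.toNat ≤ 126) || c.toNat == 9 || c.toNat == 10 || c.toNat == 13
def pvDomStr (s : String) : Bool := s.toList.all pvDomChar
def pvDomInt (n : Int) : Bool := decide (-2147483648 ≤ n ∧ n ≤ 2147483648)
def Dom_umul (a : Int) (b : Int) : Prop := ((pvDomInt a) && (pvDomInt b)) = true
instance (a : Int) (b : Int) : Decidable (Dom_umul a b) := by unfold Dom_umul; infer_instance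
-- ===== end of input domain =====

-- B replaces A's repeated-addition loop with the closed form max(a,0)*b (faster).

-- ===== PORT A =====
-- the while loop 'while a-1 >= 0: out += b; a -= 1' runs exactly a.toNat times
def umulLoop : Nat → Int → Int → Int
  | 0, out, _ => out
  | n + 1, out, b => umulLoop n (out + b) b

def umul (a : Int) (b : Int) : Int :=
  if b = 0 then 0
  else umulLoop a.toNat 0 b

-- ===== PORT B =====
def umul_alt (a : Int) (b : Int) : Int := max a 0 * b

-- ===== PRECONDITION & SPEC =====
def Spec_umul (a : Int) (b : Int) (out : Int) : Prop := out = umul_alt a b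
instance (a : Int) (b : Int) (out : Int) : Decidable (Spec_umul a b out) := by unfold Spec_umul; infer_instance

-- ===== CLAIM (what is proved, stated in full; the proofs are below) =====
def Claim_equal_umul : Prop := ∀ (a : Int) (b : Int), Dom_umul a b → Spec_umul a b (umul a b)

-- ===== LEMMAS AND PROOFS =====
theorem umulLoop_eq (n : Nat) (out b : Int) : umulLoop n out b = out + n * b := by
  induction n generalizing out with
  | zero => simp [umulLoop]
  | succ k ih => simp [umulLoop, ih]; ring

-- ===== VERDICT (by name: the statement is the Claim_ definition above) =====
theorem umul_spec : Claim_equal_umul := by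
  intro a b _
  unfold Spec_umul umul umul_alt
  split_ifs with hb
  · simp [hb]
  · rw [umulLoop_eq]
    by_cases h : a ≤ 0
    · simp [Int.toNat_of_nonpos h, max_eq_right h]
    · rw [Int.toNat_of_nonneg (by omega : (0:Int) ≤ a), max_eq_left (by omega : (0:Int) ≤ a)]; ring
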